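-- pv_equiv track=rewrite | github.com/tsaqifimtinan/tugas4-KI-C | des_server.py | text_to_hex_blocks
-- ===== SOURCE A (Python) =====
-- def text_to_hex_blocks(text):
--     """Convert text to 64-bit hex blocks"""
--     hex_str = text.encode('utf-8').hex().upper()
--     while len(hex_str) % 16 != 0:
--         hex_str += '0'
--     blocks = []
--     for i in range(0, len(hex_str), 16):
--         blocks.append(hex_str[i:i+16])
--     return blocks
-- ===== SOURCE B (Python) =====
-- def text_to_hex_blocks(text):
--     """Convert text to 64-bit hex blocks"""
--     data = text.encode('utf-8')
--     data += b'\x00' * (-len(data) % 8)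
--     blocks = []
--     while data:
--         blocks.append(data[:8].hex().upper())
--         data = data[8:]
--     return blocks
-- ===== Notes on version B (the rewrite author's own statement) =====
-- stated objective: idiomatic
-- what changed: B pads the byte string (not the hex string) with a single arithmetic pad count instead of A's while-loop, and hex-encodes per 8-byte chunk while consuming the byte string, instead of hexifying the whole text first and then slicing the hex string by index.
import Mathlib
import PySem

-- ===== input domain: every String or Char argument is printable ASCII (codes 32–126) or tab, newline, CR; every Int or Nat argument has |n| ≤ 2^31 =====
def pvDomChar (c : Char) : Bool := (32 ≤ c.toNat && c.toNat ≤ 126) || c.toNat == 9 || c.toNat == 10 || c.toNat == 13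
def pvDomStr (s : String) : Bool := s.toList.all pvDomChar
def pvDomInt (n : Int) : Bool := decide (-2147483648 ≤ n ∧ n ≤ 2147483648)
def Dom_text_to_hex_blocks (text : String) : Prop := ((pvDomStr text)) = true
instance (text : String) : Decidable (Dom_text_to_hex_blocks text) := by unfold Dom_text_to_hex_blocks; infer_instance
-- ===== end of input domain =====

-- B pads the byte string arithmetically and hex-encodes per 8-byte chunk while consuming it,
-- instead of A's hexify-whole-string-then-pad-with-a-while-loop-then-slice-by-index.


-- ===== PORT A =====
-- lowercase hex digit of n < 16 (bytes.hex() emits lowercase; A/B then apply .upper())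
def pvHexDigit (n : Nat) : Char := if n < 10 then Char.ofNat (48 + n) else Char.ofNat (87 + n)
-- the two lowercase hex chars of one byte
def pvByteHex (b : Nat) : List Char := [pvHexDigit (b / 16), pvHexDigit (b % 16)]
-- UTF-8 encoding of the text: exact on the printable-ASCII (+tab/nl/cr) domain, one byte = code point
def pvEncode (text : String) : List Nat := text.toList.map Char.toNat
-- the while loop `while len(hex_str) % 16 != 0: hex_str += '0'`
def pvPadA (s : List Char) : List Char :=
  if s.length % 16 ≠ 0 then pvPadA (s ++ ['0']) else s
  termination_by (16 - s.length % 16) % 16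
  decreasing_by simp [List.length_append]; omega

def text_to_hex_blocks (text : String) : List String :=
  -- hex_str = text.encode('utf-8').hex().upper()
  let hex0 : List Char := ((pvEncode text).flatMap pvByteHex).map PySem.Chars.upperChar
  -- while len(hex_str) % 16 != 0: hex_str += '0'
  let hexStr := pvPadA hex0
  -- for i in range(0, len(hex_str), 16): blocks.append(hex_str[i:i+16])
  (PySem.List.pyRange 0 (hexStr.length : Int) 16).foldl
    (fun blocks i => blocks ++ [String.ofList (PySem.List.slice hexStr (some i) (some (i + 16)))]) []

-- ===== PORT B =====
-- the while loop: consume 8 bytes at a time, hex each chunk (lowercase hex then .upper())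
def pvChunkLoop (data : List Nat) (blocks : List String) : List String :=
  match data with
  | [] => blocks
  | h :: t =>
      pvChunkLoop ((h :: t).drop 8)
        (blocks ++ [String.ofList ((((h :: t).take 8).flatMap pvByteHex).map PySem.Chars.upperChar)])
  termination_by data.length
  decreasing_by simp only [List.drop, List.length_drop, List.length_cons]; omega

def text_to_hex_blocks_alt (text : String) : List String :=
  let data := pvEncode text
  -- data += b'\x00' * (-len(data) % 8)
  let data := data ++ List.replicate (PySem.Int.mod (-(data.length : Int)) 8).toNat 0
  pvChunkLoop data []

-- ===== PRECONDITION & SPEC =====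
def Spec_text_to_hex_blocks (text : String) (out : List String) : Prop := out = text_to_hex_blocks_alt text
instance (text : String) (out : List String) : Decidable (Spec_text_to_hex_blocks text out) := by unfold Spec_text_to_hex_blocks; infer_instance

-- ===== CLAIM (what is proved, stated in full; the proofs are below) =====
def Claim_equal_text_to_hex_blocks : Prop := ∀ (text : String), Dom_text_to_hex_blocks text → Spec_text_to_hex_blocks text (text_to_hex_blocks text)

-- ===== LEMMAS AND PROOFS =====

-- uppercased hex of a byte list (the common value both sides compute)
def pvHexU (Q : List Nat) : List Char := (Q.flatMap pvByteHex).map PySem.Chars.upperChar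

theorem pvHexU_append (Q R : List Nat) : pvHexU (Q ++ R) = pvHexU Q ++ pvHexU R := by
  simp [pvHexU]

theorem pvHexU_length (Q : List Nat) : (pvHexU Q).length = 2 * Q.length := by
  induction Q with
  | nil => simp [pvHexU]
  | cons b t ih =>
      simp [pvHexU, pvByteHex] at ih ⊢
      omega

theorem pvHexU_zeros (k : Nat) : pvHexU (List.replicate k 0) = List.replicate (2 * k) '0' := by
  induction k with
  | zero => simp [pvHexU]
  | succ n ih =>
      rw [List.replicate_succ, show 2 * (n + 1) = 2 + 2 * n by ring, List.replicate_add]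
      rw [show (0 :: List.replicate n 0) = [0] ++ List.replicate n 0 from rfl, pvHexU_append, ih]
      rfl

theorem pvPadA_eq (s : List Char) : pvPadA s = s ++ List.replicate ((16 - s.length % 16) % 16) '0' := by
  fun_induction pvPadA s with
  | case1 s h ih =>
      rw [ih]
      have h1 : (16 - (s ++ ['0']).length % 16) % 16 + 1 = (16 - s.length % 16) % 16 := by
        simp [List.length_append]; omega
      rw [← h1, List.append_assoc]
      congr 1
  | case2 s h =>
      have h0 : s.length % 16 = 0 := by omega
      have : (16 - s.length % 16) % 16 = 0 := by omega
      simp [this]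

theorem pvChunkLoop_eq (m : Nat) (Q : List Nat) (acc : List String) (hQ : Q.length = 8 * m) :
    pvChunkLoop Q acc =
      acc ++ (List.range m).map (fun k => String.ofList (((pvHexU Q).drop (16 * k)).take 16)) := by
  induction m generalizing Q acc with
  | zero =>
      have : Q = [] := List.eq_nil_of_length_eq_zero (by omega)
      subst this; rw [pvChunkLoop.eq_def]; simp
  | succ n ih =>
      have hne : Q ≠ [] := by intro h; subst h; simp at hQ
      obtain ⟨b, t, rfl⟩ := List.exists_cons_of_ne_nil hne
      rw [pvChunkLoop.eq_def]
      simp only []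
      have hlen8 : ((b :: t).take 8).length = 8 := by
        rw [List.length_take]; omega
      have hsplit : pvHexU (b :: t) = pvHexU ((b :: t).take 8) ++ pvHexU ((b :: t).drop 8) := by
        rw [← pvHexU_append, List.take_append_drop]
      have hlen16 : (pvHexU ((b :: t).take 8)).length = 16 := by
        rw [pvHexU_length, hlen8]
      rw [ih ((b :: t).drop 8) _ (by rw [List.length_drop]; omega)]
      rw [List.range_succ_eq_map, List.map_cons, List.map_map]
      rw [List.append_assoc]
      congr 1
      rw [show 16 * 0 = 0 by ring, List.drop_zero]
      have htake : (pvHexU (b :: t)).take 16 = pvHexU ((b :: t).take 8) := by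
        rw [hsplit, List.take_append_of_le_length (by omega), ← hlen16, List.take_length]
      rw [htake, List.cons_append, List.nil_append]
      congr 1
      apply List.map_congr_left
      intro k _
      simp only [Function.comp]
      congr 2
      rw [hsplit, show 16 * k.succ = (pvHexU ((b :: t).take 8)).length + 16 * k by omega,
          List.drop_append]
      simp

theorem pvRange16 (m : Nat) :
    PySem.List.pyRange 0 ((16 * m : Nat) : Int) 16 = (List.range m).map (fun k => ((16 * k : Nat) : Int)) := by
  rw [PySem.List.pyRange_of_pos _ _ (by norm_num)]
  have : (if (0 : Int) < ((16 * m : Nat) : Int) then ((((16 * m : Nat) : Int) - 0 + 16 - 1) / 16).toNat else 0) = m := by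
    split_ifs with h
    · omega
    · omega
  rw [this]
  apply List.map_congr_left
  intro k _
  push_cast
  ring

-- ===== VERDICT (by name: the statement is the Claim_ definition above) =====
theorem text_to_hex_blocks_spec : Claim_equal_text_to_hex_blocks := by
  intro text _
  unfold Spec_text_to_hex_blocks text_to_hex_blocks text_to_hex_blocks_alt
  simp only []
  set bs := pvEncode text with hbs
  set n := bs.length with hn
  -- B's pad count
  set k := (PySem.Int.mod (-(n : Int)) 8).toNat with hk
  have hk8 : k = (8 - n % 8) % 8 := by
    simp [hk, PySem.Int.mod, Int.fmod_eq_emod]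
    omega
  -- the padded byte string and its length
  set Q := bs ++ List.replicate k 0 with hQ
  have hQlen : Q.length = 8 * ((n + 7) / 8) := by
    simp [hQ, hk8]; omega
  set m := (n + 7) / 8 with hm
  -- A's hex string before padding is pvHexU bs
  have hhex0 : ((bs.flatMap pvByteHex).map PySem.Chars.upperChar) = pvHexU bs := rfl
  rw [hhex0, pvPadA_eq]
  -- A's padded hex string is pvHexU Q
  have hpad : pvHexU bs ++ List.replicate ((16 - (pvHexU bs).length % 16) % 16) '0' = pvHexU Q := by
    rw [hQ, pvHexU_append, pvHexU_zeros, pvHexU_length]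
    congr 2
    rw [hk8, ← hn]
    omega
  rw [hpad]
  have hHlen : (pvHexU Q).length = 16 * m := by
    rw [pvHexU_length, hQlen]; ring
  rw [hHlen, pvRange16, List.foldl_map, PySem.List.foldl_append_singleton_eq_map,
      pvChunkLoop_eq m Q [] hQlen]
  simp only [List.nil_append]
  apply List.map_congr_left
  intro j _
  congr 1
  rw [show ((16 * j : Nat) : Int) + 16 = ((16 * j : Nat) : Int) + ((16 : Nat) : Int) by norm_num,
      PySem.List.slice_natCast_add]
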